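-- pv_equiv track=rewrite | github.com/ChipoXD/ProjectEuler | Problems/Problem23.py | allproductpairs
-- ===== SOURCE A (Python) =====
-- import itertools
--
-- def allproductpairs(mylist):
--     output = []
--     for x in mylist:
--         x.append(1)
--     combination = list(itertools.product(*mylist))
--     for x in combination:
--         temp = 1
--         for y in x:
--             temp *= y
--         output.append(temp)
--     output.sort()
--     output.pop(-1)
--     return output
-- ===== SOURCE B (Python) =====
-- def allproductpairs(mylist):
--     for x in mylist:
--         x.append(1)
--     products = [1]
--     for sub in mylist:
--         products = [p * y for p in products for y in sub]
--     products.sort()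
--     products.pop(-1)
--     return products
-- ===== Notes on version B (the rewrite author's own statement) =====
-- stated objective: faster
-- what changed: Instead of materializing every Cartesian-product tuple with itertools.product and re-multiplying each tuple from scratch, B folds over the sublists keeping a running list of partial products, distributing each multiplication incrementally.
import Mathlib
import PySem

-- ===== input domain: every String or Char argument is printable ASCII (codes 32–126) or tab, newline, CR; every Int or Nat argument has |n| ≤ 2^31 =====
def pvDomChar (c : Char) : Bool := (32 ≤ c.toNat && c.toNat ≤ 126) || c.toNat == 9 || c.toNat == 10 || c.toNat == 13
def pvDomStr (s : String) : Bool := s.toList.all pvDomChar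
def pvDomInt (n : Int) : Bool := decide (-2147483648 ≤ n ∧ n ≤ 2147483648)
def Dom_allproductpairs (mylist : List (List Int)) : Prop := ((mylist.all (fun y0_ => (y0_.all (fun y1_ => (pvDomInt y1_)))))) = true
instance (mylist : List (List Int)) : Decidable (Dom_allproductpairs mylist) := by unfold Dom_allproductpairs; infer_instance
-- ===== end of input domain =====

-- B replaces itertools.product + per-tuple re-multiplication by an incremental fold of partial
-- products (same values, same order). Both Pythons mutate the inner lists (append 1) in place;
-- the equivalence proved here is about the return value.

-- ===== PORT A =====
-- itertools.product(*mylist): lexicographic tuples, first list outermost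
def pvProdAll : List (List Int) → List (List Int)
  | [] => [[]]
  | l :: ls => l.flatMap fun x => (pvProdAll ls).map (fun t => x :: t)

def allproductpairs (mylist : List (List Int)) : List Int :=
  -- for x in mylist: x.append(1)
  let ml := mylist.map (fun x => x ++ [1])
  let combination := pvProdAll ml
  -- for x in combination: temp = 1; for y in x: temp *= y; output.append(temp)
  let output := combination.foldl (fun out x => out ++ [x.foldl (fun t y => t * y) 1]) []
  -- output.sort(); output.pop(-1)
  (PySem.List.sorted output (fun v => v) false).dropLast

-- ===== PORT B =====
def allproductpairs_alt (mylist : List (List Int)) : List Int :=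
  let ml := mylist.map (fun x => x ++ [1])
  -- products = [1]; for sub in ml: products = [p * y for p in products for y in sub]
  let products := ml.foldl (fun ps sub => ps.flatMap fun p => sub.map (fun y => p * y)) [1]
  (PySem.List.sorted products (fun v => v) false).dropLast

-- ===== PRECONDITION & SPEC =====
def Spec_allproductpairs (mylist : List (List Int)) (out : List Int) : Prop := out = allproductpairs_alt mylist
instance (mylist : List (List Int)) (out : List Int) : Decidable (Spec_allproductpairs mylist out) := by unfold Spec_allproductpairs; infer_instance

-- ===== CLAIM (what is proved, stated in full; the proofs are below) =====
def Claim_equal_allproductpairs : Prop := ∀ (mylist : List (List Int)), Dom_allproductpairs mylist → Spec_allproductpairs mylist (allproductpairs mylist)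

-- ===== LEMMAS AND PROOFS =====

theorem pv_foldl_app (xs : List (List Int)) (acc : List Int) :
    xs.foldl (fun out x => out ++ [x.foldl (fun t y => t * y) 1]) acc
      = acc ++ xs.map (fun x => x.foldl (fun t y => t * y) 1) := by
  induction xs generalizing acc with
  | nil => simp
  | cons a l ih => simp [ih]

theorem pv_foldl_mul (t : List Int) (a : Int) :
    t.foldl (fun t y => t * y) a = a * t.foldl (fun t y => t * y) 1 := by
  induction t generalizing a with
  | nil => simp
  | cons x l ih =>
    simp only [List.foldl_cons]
    rw [ih (a * x), ih (1 * x)]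
    ring

theorem pv_main (xs : List (List Int)) (ps : List Int) :
    xs.foldl (fun ps sub => ps.flatMap fun p => sub.map (fun y => p * y)) ps
      = ps.flatMap (fun p => (pvProdAll xs).map (fun t => p * t.foldl (fun t y => t * y) 1)) := by
  induction xs generalizing ps with
  | nil => simp [pvProdAll]
  | cons l ls ih =>
    simp only [List.foldl_cons, ih, pvProdAll]
    rw [List.flatMap_assoc]
    simp only [List.flatMap_map, List.map_flatMap, List.map_map]
    congr 1
    funext p
    congr 1
    funext x
    congr 1
    funext t
    simp only [Function.comp, List.foldl_cons]
    rw [pv_foldl_mul t (1 * x)]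
    ring

theorem pv_lists_eq (ml : List (List Int)) :
    (pvProdAll ml).foldl (fun out x => out ++ [x.foldl (fun t y => t * y) 1]) []
      = ml.foldl (fun ps sub => ps.flatMap fun p => sub.map (fun y => p * y)) [1] := by
  rw [pv_main, pv_foldl_app]
  simp

-- ===== VERDICT (by name: the statement is the Claim_ definition above) =====
theorem allproductpairs_spec : Claim_equal_allproductpairs := by
  intro mylist _
  unfold Spec_allproductpairs allproductpairs allproductpairs_alt
  simp only [pv_lists_eq]
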